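-- pv_equiv track=rewrite | github.com/Starovoitov/rag | reranking/failure_driven.py | interleave_doc_ids
-- ===== SOURCE A (Python) =====
-- def interleave_doc_ids(primary: list[str], secondary: list[str], limit: int) -> list[str]:
--     """Interleave two ranked doc-id lists while preserving order and uniqueness."""
--     merged: list[str] = []
--     seen: set[str] = set()
--     max_len = max(len(primary), len(secondary))
--     for idx in range(max_len):
--         if idx < len(primary):
--             doc_id = primary[idx]
--             if doc_id not in seen:
--                 merged.append(doc_id)
--                 seen.add(doc_id)
--                 if len(merged) >= limit:
--                     return merged
--         if idx < len(secondary):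
--             doc_id = secondary[idx]
--             if doc_id not in seen:
--                 merged.append(doc_id)
--                 seen.add(doc_id)
--                 if len(merged) >= limit:
--                     return merged
--     return merged
-- ===== SOURCE B (Python) =====
-- def interleave_doc_ids(primary: list[str], secondary: list[str], limit: int) -> list[str]:
--     """Build the interleaved stream first, then one dedup-and-cap pass over it."""
--     n = min(len(primary), len(secondary))
--     stream: list[str] = []
--     for p, s in zip(primary, secondary):
--         stream.append(p)
--         stream.append(s)
--     stream.extend(primary[n:])
--     stream.extend(secondary[n:])
--     merged: list[str] = []
--     seen: set[str] = set()
--     for d in stream: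
--         if d not in seen:
--             merged.append(d)
--             seen.add(d)
--             if len(merged) >= limit:
--                 return merged
--     return merged
-- ===== Notes on version B (the rewrite author's own statement) =====
-- stated objective: alternative
-- what changed: Replaces A's two-branch index loop (with per-index bounds checks) by a precompute-then-scan decomposition: build the interleaved stream once, then a single dedup-and-cap pass over it.
import Mathlib
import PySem

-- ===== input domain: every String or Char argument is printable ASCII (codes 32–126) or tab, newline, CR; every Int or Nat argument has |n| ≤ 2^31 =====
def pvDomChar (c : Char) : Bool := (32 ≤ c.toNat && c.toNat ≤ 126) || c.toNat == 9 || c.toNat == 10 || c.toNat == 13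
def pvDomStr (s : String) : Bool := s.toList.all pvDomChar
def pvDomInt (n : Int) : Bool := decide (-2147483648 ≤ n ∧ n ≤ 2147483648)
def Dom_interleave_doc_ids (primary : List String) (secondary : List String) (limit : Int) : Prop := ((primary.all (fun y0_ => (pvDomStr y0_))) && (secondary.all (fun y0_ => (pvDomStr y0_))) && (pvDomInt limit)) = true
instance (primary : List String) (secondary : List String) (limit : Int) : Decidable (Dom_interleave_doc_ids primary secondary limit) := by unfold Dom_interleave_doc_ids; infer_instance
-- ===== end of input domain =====

-- B replaces A's two-branch index loop by precompute-the-interleaved-stream, then one dedup-and-cap pass (alternative decomposition, same cost).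


-- ===== PORT A =====
-- A's `for idx in range(max_len)` with its `idx < len(...)` guards is transcribed as
-- simultaneous structural recursion on the two list tails; each step runs the primary
-- branch then the secondary branch in order, with the same state (merged, seen) and the
-- same after-append early return `len(merged) >= limit`.
def interleaveALoop (limit : Int) : List String → List String → List String → PySem.Set String → List String
  | [], [], merged, _ => merged
  | [], s :: ss, merged, seen =>
      if s ∈ seen then interleaveALoop limit [] ss merged seen
      else if ((merged.length : Int) + 1 ≥ limit) then merged ++ [s]
      else interleaveALoop limit [] ss (merged ++ [s]) (seen.add s)
  | p :: ps, [], merged, seen =>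
      if p ∈ seen then interleaveALoop limit ps [] merged seen
      else if ((merged.length : Int) + 1 ≥ limit) then merged ++ [p]
      else interleaveALoop limit ps [] (merged ++ [p]) (seen.add p)
  | p :: ps, s :: ss, merged, seen =>
      if p ∈ seen then
        -- primary doc already seen: go straight to the secondary branch
        if s ∈ seen then interleaveALoop limit ps ss merged seen
        else if ((merged.length : Int) + 1 ≥ limit) then merged ++ [s]
        else interleaveALoop limit ps ss (merged ++ [s]) (seen.add s)
      else if ((merged.length : Int) + 1 ≥ limit) then merged ++ [p]
      else
        -- appended p, no early return: secondary branch with the updated state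
        if s ∈ seen.add p then interleaveALoop limit ps ss (merged ++ [p]) (seen.add p)
        else if (((merged ++ [p]).length : Int) + 1 ≥ limit) then (merged ++ [p]) ++ [s]
        else interleaveALoop limit ps ss ((merged ++ [p]) ++ [s]) ((seen.add p).add s)

def interleave_doc_ids (primary : List String) (secondary : List String) (limit : Int) : List String :=
  interleaveALoop limit primary secondary [] (PySem.Set.ofList [])

-- ===== PORT B =====
-- Source B: zip-pairs flattened plus the leftover tails = the interleaved stream
def interleaveStream : List String → List String → List String
  | [], ss => ss
  | ps, [] => ps
  | p :: ps, s :: ss => p :: s :: interleaveStream ps ss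

-- Source B's single pass: dedup and cap over the precomputed stream
def interleaveBLoop (limit : Int) : List String → List String → PySem.Set String → List String
  | [], merged, _ => merged
  | d :: rest, merged, seen =>
      if d ∈ seen then interleaveBLoop limit rest merged seen
      else if ((merged.length : Int) + 1 ≥ limit) then merged ++ [d]
      else interleaveBLoop limit rest (merged ++ [d]) (seen.add d)

def interleave_doc_ids_alt (primary : List String) (secondary : List String) (limit : Int) : List String :=
  interleaveBLoop limit (interleaveStream primary secondary) [] (PySem.Set.ofList [])

-- ===== PRECONDITION & SPEC =====
def Spec_interleave_doc_ids (primary : List String) (secondary : List String) (limit : Int) (out : List String) : Prop := out = interleave_doc_ids_alt primary secondary limit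
instance (primary : List String) (secondary : List String) (limit : Int) (out : List String) : Decidable (Spec_interleave_doc_ids primary secondary limit out) := by unfold Spec_interleave_doc_ids; infer_instance

-- ===== CLAIM (what is proved, stated in full; the proofs are below) =====
def Claim_equal_interleave_doc_ids : Prop := ∀ (primary : List String) (secondary : List String) (limit : Int), Dom_interleave_doc_ids primary secondary limit → Spec_interleave_doc_ids primary secondary limit (interleave_doc_ids primary secondary limit)

-- ===== LEMMAS AND PROOFS =====

-- A's index loop over both lists equals B's single pass over the interleaved stream.
theorem interleaveStream_nil_left (ss : List String) : interleaveStream [] ss = ss := by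
  cases ss <;> rfl

theorem interleaveStream_nil_right (ps : List String) : interleaveStream ps [] = ps := by
  cases ps <;> rfl

theorem interleave_loop_eq (limit : Int) :
    ∀ (ps ss merged : List String) (seen : PySem.Set String),
      interleaveALoop limit ps ss merged seen = interleaveBLoop limit (interleaveStream ps ss) merged seen := by
  intro ps
  induction ps with
  | nil =>
      intro ss
      induction ss with
      | nil => intro merged seen; simp [interleaveALoop, interleaveBLoop, interleaveStream]
      | cons s ss ih =>
          intro merged seen
          have ih' : ∀ m sn, interleaveALoop limit [] ss m sn = interleaveBLoop limit ss m sn := by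
            intro m sn; have h := ih m sn; rwa [interleaveStream_nil_left] at h
          rw [interleaveStream_nil_left]
          simp only [interleaveALoop, interleaveBLoop]
          split_ifs <;> simp [ih']
  | cons p ps ihp =>
      intro ss
      have hnr : ∀ m sn, interleaveALoop limit ps [] m sn = interleaveBLoop limit ps m sn := by
        intro m sn; have h := ihp [] m sn; rwa [interleaveStream_nil_right] at h
      cases ss with
      | nil =>
          intro merged seen
          rw [interleaveStream_nil_right]
          simp only [interleaveALoop, interleaveBLoop]
          split_ifs <;> simp [hnr]
      | cons s ss =>
          intro merged seen
          simp only [interleaveALoop, interleaveStream, interleaveBLoop]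
          split_ifs <;> simp [ihp ss]

-- ===== VERDICT (by name: the statement is the Claim_ definition above) =====
theorem interleave_doc_ids_spec : Claim_equal_interleave_doc_ids := by
  intro primary secondary limit _
  unfold Spec_interleave_doc_ids interleave_doc_ids interleave_doc_ids_alt
  exact interleave_loop_eq limit primary secondary [] (PySem.Set.ofList [])
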